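-- pv_equiv track=rewrite | github.com/JordanH821/bctci | 29/29.6.py | solution
-- ===== SOURCE A (Python) =====
-- def solution(p1: list[int], p2: list[int]) -> int:
-- 	if len(p1) == 2:
-- 		return 1
-- 	l: int = 0
-- 	r: int = len(p1)-1
-- 	while r - l > 1:
-- 		mid: int = (l+r)//2
-- 		if p1[mid] > p2[mid]:
-- 			l = mid
-- 		else:
-- 			r = mid
-- 	return r
-- ===== SOURCE B (Python) =====
-- def solution(p1: list[int], p2: list[int]) -> int:
--     def f(off: int, a: list[int], b: list[int]) -> int:
--         n = len(a)
--         if n <= 2: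
--             return off + n - 1
--         m = (n - 1) // 2
--         if a[m] > b[m]:
--             return f(off + m, a[m:], b[m:])
--         return f(off, a[:m+1], b[:m+1])
--     return f(0, p1, p2)
-- ===== Notes on version B (the rewrite author's own statement) =====
-- stated objective: alternative
-- what changed: The imperative while-loop over index pair (l,r) into fixed arrays is replaced by recursion that physically splits the lists: a helper carries an offset and the current sublists, probes their relative midpoint, and recurses on the sliced halves; the 'len(p1)==2: return 1' guard is absorbed by the base case.
-- outside the precondition, e.g. on solution([9, 1, 0, 0], [0, 5]): A returns 1, B returns 1
import Mathlib
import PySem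

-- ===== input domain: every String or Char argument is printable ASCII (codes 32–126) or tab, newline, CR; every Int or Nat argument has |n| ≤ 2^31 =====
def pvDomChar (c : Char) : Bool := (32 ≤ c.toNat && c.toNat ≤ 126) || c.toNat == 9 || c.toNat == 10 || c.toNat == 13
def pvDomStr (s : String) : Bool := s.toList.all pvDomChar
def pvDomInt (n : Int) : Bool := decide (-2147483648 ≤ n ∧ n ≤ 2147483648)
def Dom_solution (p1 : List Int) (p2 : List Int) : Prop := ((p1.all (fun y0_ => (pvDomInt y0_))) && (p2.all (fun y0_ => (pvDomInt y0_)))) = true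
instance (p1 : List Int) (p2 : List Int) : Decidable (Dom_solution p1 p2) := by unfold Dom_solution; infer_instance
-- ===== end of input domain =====

-- B replaces A's index-pair while-loop (plus its redundant 'len(p1)==2' guard) by recursion
-- that physically splits the lists at the midpoint, carrying an offset; same return values on Pre_.

-- ===== PORT A =====
-- midpoint bounds used by both termination proofs
theorem pvMid_lt (l r : Int) (h : r - l > 1) :
    (r - PySem.Int.floordiv (l + r) 2).toNat < (r - l).toNat ∧
    (PySem.Int.floordiv (l + r) 2 - l).toNat < (r - l).toNat := by
  have h1 : (l + 1) ≤ PySem.Int.floordiv (l + r) 2 :=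
    (PySem.Int.le_floordiv_iff_mul_le (by omega)).mpr (by omega)
  have h2 : PySem.Int.floordiv (l + r) 2 < r :=
    (PySem.Int.floordiv_lt_iff_lt_mul (by omega)).mpr (by omega)
  omega

-- the while-loop of A, with mutable state l, r as parameters
def pvLoopA (p1 p2 : List Int) (l r : Int) : Int :=
  if _h : r - l > 1 then
    let mid : Int := PySem.Int.floordiv (l + r) 2
    if PySem.List.pyGetD p1 mid 0 > PySem.List.pyGetD p2 mid 0 then
      pvLoopA p1 p2 mid r
    else
      pvLoopA p1 p2 l mid
  else r
termination_by (r - l).toNat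
decreasing_by
  · exact (pvMid_lt l r _h).1
  · exact (pvMid_lt l r _h).2

def solution (p1 : List Int) (p2 : List Int) : Int :=
  if p1.length = 2 then 1
  else pvLoopA p1 p2 0 ((p1.length : Int) - 1)

-- ===== PORT B =====
-- bounds on B's relative midpoint m = (n-1)//2 (used for termination of pvG)
theorem pvM_bounds (n : Nat) (hn : ¬ n ≤ 2) :
    1 ≤ PySem.Int.floordiv ((n : Int) - 1) 2 ∧
    PySem.Int.floordiv ((n : Int) - 1) 2 + 1 < (n : Int) := by
  refine ⟨(PySem.Int.le_floordiv_iff_mul_le (by omega)).mpr (by omega), ?_⟩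
  have h2 : PySem.Int.floordiv ((n : Int) - 1) 2 < (n : Int) - 1 :=
    (PySem.Int.floordiv_lt_iff_lt_mul (by omega)).mpr (by omega)
  omega

-- B's recursive helper f: recursion on the physical sublists, with their start offset
theorem pvG_dec1 (a : List Int) (h : ¬ a.length ≤ 2) :
    (PySem.List.slice a (some (PySem.Int.floordiv ((a.length : Int) - 1) 2))).length < a.length := by
  have hb := pvM_bounds a.length h
  rw [PySem.List.slice_from a (by omega)]
  rw [List.length_drop]
  omega

theorem pvG_dec2 (a : List Int) (h : ¬ a.length ≤ 2) :
    (PySem.List.slice a none (some (PySem.Int.floordiv ((a.length : Int) - 1) 2 + 1))).length < a.length := by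
  have hb := pvM_bounds a.length h
  rw [PySem.List.slice_to a (by omega)]
  rw [List.length_take]
  omega

def pvG (off : Int) (a b : List Int) : Int :=
  if h : a.length ≤ 2 then off + (a.length : Int) - 1
  else
    let m : Int := PySem.Int.floordiv ((a.length : Int) - 1) 2
    if PySem.List.pyGetD a m 0 > PySem.List.pyGetD b m 0 then
      pvG (off + m) (PySem.List.slice a (some m) none) (PySem.List.slice b (some m) none)
    else
      pvG off (PySem.List.slice a none (some (m + 1))) (PySem.List.slice b none (some (m + 1)))
termination_by a.length
decreasing_by
  · exact pvG_dec1 a h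
  · exact pvG_dec2 a h

def solution_alt (p1 : List Int) (p2 : List Int) : Int :=
  pvG 0 p1 p2

-- ===== PRECONDITION & SPEC =====
-- Pre_ excludes pairs where p2 is more than one element shorter than p1 (and p1 has ≥ 3
-- elements): there the probe sequence can index past the end of p2 and A raises IndexError;
-- on data where the probes happen to stay short of that, both programs still agree.
def Pre_solution (p1 : List Int) (p2 : List Int) : Prop :=
  p1.length ≤ 2 ∨ p1.length ≤ p2.length + 1
instance (p1 : List Int) (p2 : List Int) : Decidable (Pre_solution p1 p2) := by
  unfold Pre_solution; infer_instance
def pvWitness_solution : List Int × List Int := ([3, 2, 1, 0], [0, 1, 2, 3])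

def Spec_solution (p1 : List Int) (p2 : List Int) (out : Int) : Prop := out = solution_alt p1 p2
instance (p1 : List Int) (p2 : List Int) (out : Int) : Decidable (Spec_solution p1 p2 out) := by unfold Spec_solution; infer_instance

-- ===== CLAIM (what is proved, stated in full; the proofs are below) =====
def Claim_equal_solution : Prop := ∀ (p1 : List Int) (p2 : List Int), Dom_solution p1 p2 → Pre_solution p1 p2 → Spec_solution p1 p2 (solution p1 p2)

-- ===== LEMMAS AND PROOFS =====

theorem pvGetD_drop (xs : List Int) (k i : Nat) (d : Int) :
    (xs.drop k).getD i d = xs.getD (k + i) d := by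
  simp [List.getD, List.getElem?_drop]

theorem pvGetD_take (xs : List Int) (k i : Nat) (d : Int) (h : i < k) :
    (xs.take k).getD i d = xs.getD i d := by
  simp [List.getD, h]

-- B's recursion on sublists computes A's loop, given that the sublists mirror p1/p2 from offset L
theorem pvG_eq_loop (p1 p2 : List Int) (a b : List Int) (L : Nat)
    (ha : ∀ i : Nat, i < a.length → a.getD i 0 = p1.getD (L + i) 0)
    (hb : ∀ i : Nat, i + 1 < a.length → b.getD i 0 = p2.getD (L + i) 0) :
    pvG (L : Int) a b = pvLoopA p1 p2 (L : Int) ((L : Int) + (a.length : Int) - 1) := by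
  by_cases h : a.length ≤ 2
  · rw [pvG, pvLoopA]
    rw [dif_pos h, dif_neg (by omega)]
  · have hmb := pvM_bounds a.length h
    set n := a.length with hn
    set m : Int := PySem.Int.floordiv ((n : Int) - 1) 2 with hm
    have hM : ∃ M : Nat, m = (M : Int) ∧ 1 ≤ M ∧ M + 2 ≤ n := by
      refine ⟨m.toNat, by omega, by omega, by omega⟩
    obtain ⟨M, hMm, hM1, hM2⟩ := hM
    -- A's absolute midpoint is L + M
    have hmid : PySem.Int.floordiv ((L : Int) + ((L : Int) + (n : Int) - 1)) 2 = (L : Int) + m := by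
      rw [PySem.Int.floordiv_eq_iff_of_pos (by omega)]
      have q1 : 2 * m ≤ (n : Int) - 1 :=
        (PySem.Int.le_floordiv_iff_mul_le (b := 2) (by omega)).mp (le_refl m) |>.trans_eq' (by ring)
      have q2 : (n : Int) - 1 < 2 * (m + 1) := by
        have := (PySem.Int.floordiv_lt_iff_lt_mul (b := 2) (by omega)).mp
          (show m < m + 1 by omega)
        omega
      constructor <;> omega
    rw [pvG, pvLoopA]
    rw [dif_neg h, dif_pos (by omega)]
    simp only [← hn, ← hm, hmid]
    -- the probed values agree
    have hva : PySem.List.pyGetD a m 0 = PySem.List.pyGetD p1 ((L : Int) + m) 0 := by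
      rw [hMm, show (L : Int) + (M : Int) = ((L + M : Nat) : Int) by push_cast; ring]
      rw [PySem.List.pyGetD_natCast, PySem.List.pyGetD_natCast]
      exact ha M (by omega)
    have hvb : PySem.List.pyGetD b m 0 = PySem.List.pyGetD p2 ((L : Int) + m) 0 := by
      rw [hMm, show (L : Int) + (M : Int) = ((L + M : Nat) : Int) by push_cast; ring]
      rw [PySem.List.pyGetD_natCast, PySem.List.pyGetD_natCast]
      exact hb M (by omega)
    rw [hva, hvb]
    by_cases hc : PySem.List.pyGetD p1 ((L : Int) + m) 0 > PySem.List.pyGetD p2 ((L : Int) + m) 0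
    · rw [if_pos hc, if_pos hc]
      rw [hMm, PySem.List.slice_from a (by omega), PySem.List.slice_from b (by omega)]
      have hnat : ((M : Int)).toNat = M := by omega
      rw [hnat]
      have hrec := pvG_eq_loop p1 p2 (a.drop M) (b.drop M) (L + M)
        (by intro i hi
            rw [pvGetD_drop]
            have : M + i < a.length := by simp [List.length_drop] at hi; omega
            rw [ha (M + i) this]; ring_nf)
        (by intro i hi
            rw [pvGetD_drop]
            have : (M + i) + 1 < a.length := by simp [List.length_drop] at hi; omega
            rw [hb (M + i) this]; ring_nf)
      rw [show ((L : Int) + (M : Int)) = (((L + M : Nat)) : Int) by push_cast; ring]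
      rw [hrec]
      congr 1
      simp only [List.length_drop]
      push_cast
      omega
    · rw [if_neg hc, if_neg hc]
      rw [hMm, show (M : Int) + 1 = ((M + 1 : Nat) : Int) by push_cast; ring]
      rw [PySem.List.slice_to a (by omega), PySem.List.slice_to b (by omega)]
      have hnat : ((M + 1 : Nat) : Int).toNat = M + 1 := by omega
      rw [hnat]
      have hrec := pvG_eq_loop p1 p2 (a.take (M + 1)) (b.take (M + 1)) L
        (by intro i hi
            have hiM : i < M + 1 := by simp [List.length_take] at hi; omega
            rw [pvGetD_take _ _ _ _ hiM]
            exact ha i (by omega))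
        (by intro i hi
            have hiM : i + 1 < M + 1 := by simp [List.length_take] at hi; omega
            rw [pvGetD_take _ _ _ _ (by omega)]
            exact hb i (by omega))
      rw [hrec]
      congr 1
      simp only [List.length_take]
      push_cast
      omega
termination_by a.length
decreasing_by
  · simp only [List.length_drop]; omega
  · simp only [List.length_take]; omega

-- ===== VERDICT (by name: the statement is the Claim_ definition above) =====
theorem solution_spec : Claim_equal_solution := by
  intro p1 p2 _ _
  unfold Spec_solution solution solution_alt
  have hmain : pvG (0 : Int) p1 p2 = pvLoopA p1 p2 0 ((p1.length : Int) - 1) := by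
    have := pvG_eq_loop p1 p2 p1 p2 0
      (by intro i _; simp) (by intro i _; simp)
    simpa using this
  by_cases h2 : p1.length = 2
  · rw [if_pos h2, hmain, h2]
    rw [pvLoopA]; norm_num
  · rw [if_neg h2, hmain]
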